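-- pv_equiv track=rewrite | github.com/eliottcassidy2000/math | 04-computation/W_ihalf_n7_focused.py | compute_H_and_Nf_dp
-- ===== SOURCE A (Python) =====
-- def compute_H_and_Nf_dp(T):
--     """
--     Bitmask DP to compute N_f = #{permutations with f forward edges}.
--     Returns (H, [N_0, ..., N_6]).
--     O(2^n * n^2 * n) = O(2^7 * 49 * 7) = ~44K operations. Very fast.
--     """
--     n = len(T)
--     deg = n - 1  # 6
--     full = (1 << n) - 1
--
--     # dp[mask][v] = list of counts by f (forward-edge count)
--     # f ranges 0..6. We store as a flat array.
--     # Total entries: 128 * 7 = 896, each with 7 ints.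
--
--     # For memory efficiency, use a 3D array
--     dp = [[[0] * n for _ in range(n)] for _ in range(1 << n)]
--
--     for v in range(n):
--         dp[1 << v][v][0] = 1
--
--     for mask in range(1, 1 << n):
--         for v in range(n):
--             if not (mask & (1 << v)):
--                 continue
--             fv = dp[mask][v]
--             for u in range(n):
--                 if mask & (1 << u):
--                     continue
--                 new_mask = mask | (1 << u)
--                 if T[v][u]:  # forward edge
--                     for f in range(deg):
--                         if fv[f]:
--                             dp[new_mask][u][f + 1] += fv[f]
--                 else:  # backward
--                     for f in range(n):
--                         if fv[f]:
--                             dp[new_mask][u][f] += fv[f]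
--
--     Nf = [0] * n
--     for v in range(n):
--         for f in range(n):
--             Nf[f] += dp[full][v][f]
--
--     H = Nf[deg]
--     return H, Nf
-- ===== SOURCE B (Python) =====
-- def compute_H_and_Nf_dp(T):
--     """Brute force: enumerate all permutations (built by choosing the last
--     element recursively) and tally the count of forward edges between
--     consecutive positions."""
--     n = len(T)
--
--     def perms_last(items):
--         if not items:
--             return [[]]
--         out = []
--         for v in items:
--             rest = [x for x in items if x != v]
--             for q in perms_last(rest):
--                 out.append(q + [v])
--         return out
--
--     Nf = [0] * n
--     for p in perms_last(list(range(n))):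
--         f = 0
--         for i in range(n - 1):
--             if T[p[i]][p[i + 1]]:
--                 f += 1
--         Nf[f] += 1
--     return Nf[n - 1], Nf
-- ===== Notes on version B (the rewrite author's own statement) =====
-- stated objective: simpler
-- what changed: Replaces the bottom-up bitmask DP over a 2^n x n x n table by a direct brute-force enumeration of all permutations (built recursively by choice of last element), tallying consecutive forward edges per permutation.
import Mathlib
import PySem

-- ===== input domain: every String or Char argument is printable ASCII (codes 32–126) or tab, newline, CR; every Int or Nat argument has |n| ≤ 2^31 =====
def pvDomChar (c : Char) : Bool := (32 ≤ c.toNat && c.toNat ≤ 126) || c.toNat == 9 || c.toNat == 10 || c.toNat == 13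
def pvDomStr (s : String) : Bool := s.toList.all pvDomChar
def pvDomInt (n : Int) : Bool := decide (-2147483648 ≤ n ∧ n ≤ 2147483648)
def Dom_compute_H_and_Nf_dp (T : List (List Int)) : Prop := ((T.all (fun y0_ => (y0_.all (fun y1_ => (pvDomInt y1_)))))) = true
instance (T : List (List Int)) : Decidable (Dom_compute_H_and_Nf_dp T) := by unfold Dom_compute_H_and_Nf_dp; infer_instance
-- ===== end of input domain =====

-- B replaces the bottom-up bitmask DP over a 2^n×n×n table by a plain brute-force
-- enumeration of all permutations (chosen-last-element recursion), tallying forward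
-- edges between consecutive positions; objective: simpler (not faster).

-- ===== PORT A =====
-- dp[M][u][f] += d  (in-bounds, else no-op — Python only writes in bounds)
def pvBump (dp : List (List (List Int))) (M u f : Nat) (d : Int) : List (List (List Int)) :=
  dp.modify M (fun pl => pl.modify u (fun row => row.modify f (fun x => x + d)))

-- dp[M][u][f] = 1
def pvSet1 (dp : List (List (List Int))) (M u f : Nat) : List (List (List Int)) :=
  dp.modify M (fun pl => pl.modify u (fun row => row.modify f (fun _ => 1)))

-- 'for f in range(deg): if fv[f]: dp[new_mask][u][f+1] += fv[f]'
def pvFStepF (nm u : Nat) (fv : List Int) (dp : List (List (List Int))) (f : Nat) :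
    List (List (List Int)) :=
  if fv.getD f 0 ≠ 0 then pvBump dp nm u (f + 1) (fv.getD f 0) else dp

-- 'for f in range(n): if fv[f]: dp[new_mask][u][f] += fv[f]'
def pvFStepB (nm u : Nat) (fv : List Int) (dp : List (List (List Int))) (f : Nat) :
    List (List (List Int)) :=
  if fv.getD f 0 ≠ 0 then pvBump dp nm u f (fv.getD f 0) else dp

-- body of the 'for u in range(n)' loop
def pvUStep (T : List (List Int)) (n m v : Nat) (fv : List Int)
    (dp : List (List (List Int))) (u : Nat) : List (List (List Int)) :=
  if m &&& (1 <<< u) ≠ 0 then dp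
  else  -- new_mask = m ||| (1 <<< u)
    if (T.getD v []).getD u 0 ≠ 0 then
      (List.range (n - 1)).foldl (pvFStepF (m ||| (1 <<< u)) u fv) dp
    else
      (List.range n).foldl (pvFStepB (m ||| (1 <<< u)) u fv) dp

-- body of the 'for v in range(n)' loop
def pvVStep (T : List (List Int)) (n m : Nat)
    (dp : List (List (List Int))) (v : Nat) : List (List (List Int)) :=
  if m &&& (1 <<< v) == 0 then dp
  else
    let fv := (dp.getD m []).getD v []
    (List.range n).foldl (pvUStep T n m v fv) dp

-- body of the 'for mask in range(1, 1 << n)' loop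
def pvMaskStep (T : List (List Int)) (n : Nat)
    (dp : List (List (List Int))) (m : Nat) : List (List (List Int)) :=
  (List.range n).foldl (pvVStep T n m) dp

def compute_H_and_Nf_dp (T : List (List Int)) : Int × List Int :=
  let n := T.length
  let deg := n - 1
  let full := (1 <<< n) - 1
  let dp0 := List.replicate (1 <<< n) (List.replicate n (List.replicate n (0 : Int)))
  let dp1 := (List.range n).foldl (fun dp v => pvSet1 dp (1 <<< v) v 0) dp0
  let dp2 := (List.range' 1 ((1 <<< n) - 1)).foldl (pvMaskStep T n) dp1
  let Nf := (List.range n).foldl (fun Nf v =>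
      (List.range n).foldl
        (fun Nf f => Nf.modify f (fun x => x + ((dp2.getD full []).getD v []).getD f 0)) Nf)
    (List.replicate n (0 : Int))
  (Nf.getD deg 0, Nf)

-- ===== PORT B =====
-- all permutations of l, generated by choosing the LAST element ('for v in items: rest = [x for x in items if x != v] …')
def pvPermsLast (l : List Nat) : List (List Nat) :=
  if l = [] then [[]]
  else
    l.attach.foldl
      (fun out vp =>
        out ++ (pvPermsLast (l.filter (fun x => x != vp.1))).map (fun q => q ++ [vp.1])) []
termination_by l.length
decreasing_by
  simp only [List.unattach_filter, List.length_unattach, List.unattach_attach]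
  apply List.length_filter_lt_length_iff_exists.mpr
  exact ⟨vp.1, vp.2, by simp⟩

def compute_H_and_Nf_dp_alt (T : List (List Int)) : Int × List Int :=
  let n := T.length
  let Nf := (pvPermsLast (List.range n)).foldl
      (fun Nf p =>
        let f := (List.range (n - 1)).foldl
          (fun f i =>
            if (T.getD (p.getD i 0) []).getD (p.getD (i + 1) 0) 0 ≠ 0 then f + 1 else f) 0
        Nf.modify f (fun x => x + 1))
    (List.replicate n (0 : Int))
  (Nf.getD (n - 1) 0, Nf)

-- ===== PRECONDITION & SPEC =====
-- Pre_ excludes exactly the inputs where Python A raises IndexError: the empty matrix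
-- (Nf[-1] on an empty list) and matrices with a row too short for the T[v][u] accesses
-- (row i needs length ≥ n, except the last row, whose largest accessed column is n-2).
def Pre_compute_H_and_Nf_dp (T : List (List Int)) : Prop :=
  T ≠ [] ∧ ∀ i < T.length,
    (if i = T.length - 1 then T.length - 1 else T.length) ≤ (T.getD i []).length
instance (T : List (List Int)) : Decidable (Pre_compute_H_and_Nf_dp T) := by
  unfold Pre_compute_H_and_Nf_dp; infer_instance
def pvWitness_compute_H_and_Nf_dp : List (List Int) := [[0, 1], [1, 0]]

def Spec_compute_H_and_Nf_dp (T : List (List Int)) (out : Int × List Int) : Prop := out = compute_H_and_Nf_dp_alt T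
instance (T : List (List Int)) (out : Int × List Int) : Decidable (Spec_compute_H_and_Nf_dp T out) := by unfold Spec_compute_H_and_Nf_dp; infer_instance

-- ===== CLAIM (what is proved, stated in full; the proofs are below) =====
def Claim_equal_compute_H_and_Nf_dp : Prop := ∀ (T : List (List Int)), Dom_compute_H_and_Nf_dp T → Pre_compute_H_and_Nf_dp T → Spec_compute_H_and_Nf_dp T (compute_H_and_Nf_dp T)

-- ===== LEMMAS AND PROOFS =====

-- cell getter
def pvG (dp : List (List (List Int))) (M u f : Nat) : Int :=
  ((dp.getD M []).getD u []).getD f 0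

-- the table is a N×n×n cube
def pvShape (N n : Nat) (dp : List (List (List Int))) : Prop :=
  dp.length = N ∧ ∀ M, M < N →
    (dp.getD M []).length = n ∧ ∀ u, u < n → ((dp.getD M []).getD u []).length = n

lemma pvGetD_modify {α : Type} (l : List α) (i : Nat) (g : α → α) (j : Nat) (d : α) :
    (l.modify i g).getD j d = if i = j ∧ j < l.length then g (l.getD j d) else l.getD j d := by
  by_cases hj : j < l.length
  · have h : l[j]? = some l[j] := List.getElem?_eq_getElem hj
    by_cases hij : i = j <;>
      simp [List.getD_eq_getElem?_getD, List.getElem?_modify, h, hj, hij]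
  · have h : l[j]? = none := List.getElem?_eq_none (by omega)
    simp [List.getD_eq_getElem?_getD, List.getElem?_modify, h, hj]

lemma pvShape_modify3 {N n : Nat} {dp : List (List (List Int))} (h : pvShape N n dp)
    (M u f : Nat) (g : Int → Int) :
    pvShape N n (dp.modify M (fun pl => pl.modify u (fun row => row.modify f g))) := by
  obtain ⟨h1, h2⟩ := h
  refine ⟨by simpa using h1, fun M' hM' => ?_⟩
  rw [pvGetD_modify]
  by_cases hMM : M = M'
  · subst hMM
    rw [if_pos ⟨rfl, by omega⟩]
    refine ⟨by simpa using (h2 M hM').1, fun u' hu' => ?_⟩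
    rw [pvGetD_modify]
    by_cases huu : u = u'
    · subst huu
      by_cases hub : u < (dp.getD M []).length
      · rw [if_pos ⟨rfl, hub⟩]; simpa using (h2 M hM').2 u hu'
      · rw [if_neg (by tauto)]; exact (h2 M hM').2 u hu'
    · rw [if_neg (by tauto)]; exact (h2 M hM').2 u' hu'
  · rw [if_neg (by tauto)]; exact h2 M' hM'

lemma pvG_modify3 {N n : Nat} {dp : List (List (List Int))} (h : pvShape N n dp)
    {M u f : Nat} (hM : M < N) (hu : u < n) (hf : f < n) (g : Int → Int) (M' u' f' : Nat) :
    pvG (dp.modify M (fun pl => pl.modify u (fun row => row.modify f g))) M' u' f' =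
      if M = M' ∧ u = u' ∧ f = f' then g (pvG dp M u f) else pvG dp M' u' f' := by
  obtain ⟨h1, h2⟩ := h
  rw [pvG, pvGetD_modify]
  by_cases hMM : M = M'
  · subst hMM
    rw [if_pos ⟨rfl, by omega⟩, pvGetD_modify]
    by_cases huu : u = u'
    · subst huu
      rw [if_pos ⟨rfl, by rw [(h2 M hM).1]; omega⟩, pvGetD_modify]
      by_cases hff : f = f'
      · subst hff
        rw [if_pos ⟨rfl, by rw [(h2 M hM).2 u hu]; omega⟩]
        simp [pvG]
      · rw [if_neg (by tauto)]
        simp [pvG, hff]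
    · rw [if_neg (by tauto)]
      simp [pvG, huu]
  · rw [if_neg (by tauto)]
    simp [pvG, hMM]

lemma pvShape_bump {N n : Nat} {dp : List (List (List Int))} (h : pvShape N n dp)
    (M u f : Nat) (d : Int) : pvShape N n (pvBump dp M u f d) :=
  pvShape_modify3 h M u f _

lemma pvG_bump {N n : Nat} {dp : List (List (List Int))} (h : pvShape N n dp)
    {M u f : Nat} (hM : M < N) (hu : u < n) (hf : f < n) (d : Int) (M' u' f' : Nat) :
    pvG (pvBump dp M u f d) M' u' f' =
      pvG dp M' u' f' + (if M = M' ∧ u = u' ∧ f = f' then d else 0) := by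
  rw [pvBump, pvG_modify3 h hM hu hf _ M' u' f']
  split_ifs with hc
  · obtain ⟨hc1, hc2, hc3⟩ := hc; subst hc1; subst hc2; subst hc3; ring
  · ring

lemma pvShape_set1 {N n : Nat} {dp : List (List (List Int))} (h : pvShape N n dp)
    (M u f : Nat) : pvShape N n (pvSet1 dp M u f) :=
  pvShape_modify3 h M u f _

lemma pvG_set1 {N n : Nat} {dp : List (List (List Int))} (h : pvShape N n dp)
    {M u f : Nat} (hM : M < N) (hu : u < n) (hf : f < n) (M' u' f' : Nat) :
    pvG (pvSet1 dp M u f) M' u' f' =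
      if M = M' ∧ u = u' ∧ f = f' then 1 else pvG dp M' u' f' := by
  rw [pvSet1, pvG_modify3 h hM hu hf _ M' u' f']

-- ---- bit lemmas ----
lemma pvTbPow (u i : Nat) : (1 <<< u).testBit i = decide (u = i) := by
  rw [Nat.shiftLeft_eq, one_mul, Nat.testBit_two_pow]

lemma pvAndZero (M u : Nat) : M &&& (1 <<< u) = 0 ↔ M.testBit u = false := by
  constructor
  · intro h
    have h2 := congrArg (fun x => x.testBit u) h
    simp only [Nat.testBit_and, pvTbPow] at h2
    simpa using h2
  · intro h
    apply Nat.eq_of_testBit_eq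
    intro i
    simp only [Nat.testBit_and, pvTbPow, Nat.zero_testBit]
    by_cases hiu : u = i
    · subst hiu; simp [h]
    · simp [hiu]

lemma pvXorLt {M u : Nat} (h : M.testBit u = true) : M ^^^ (1 <<< u) < M := by
  apply Nat.lt_of_testBit u
  · simp only [Nat.testBit_xor, pvTbPow]
    simp [h]
  · exact h
  · intro j hj
    have huj : u ≠ j := by omega
    simp only [Nat.testBit_xor, pvTbPow]
    simp [huj]

lemma pvOrXor {M u : Nat} (h : M.testBit u = false) :
    (M ||| (1 <<< u)) ^^^ (1 <<< u) = M := by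
  apply Nat.eq_of_testBit_eq
  intro i
  simp only [Nat.testBit_xor, Nat.testBit_or, pvTbPow]
  by_cases hiu : u = i
  · subst hiu; simp [h]
  · simp [hiu]

lemma pvPowLt {u n : Nat} (h : u < n) : 1 <<< u < 2 ^ n := by
  rw [Nat.shiftLeft_eq, one_mul]
  exact Nat.pow_lt_pow_right (by omega) h

lemma pvOrLt {M u n : Nat} (hM : M < 2 ^ n) (hu : u < n) : M ||| (1 <<< u) < 2 ^ n :=
  Nat.or_lt_two_pow hM (pvPowLt hu)

lemma pvOrNe {M u : Nat} (h : M.testBit u = false) : M ||| (1 <<< u) ≠ M := by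
  intro hc
  have h2 := congrArg (fun x => x.testBit u) hc
  simp only [Nat.testBit_or, pvTbPow] at h2
  simp [h] at h2

lemma pvTbFull {n i : Nat} : (2 ^ n - 1).testBit i = decide (i < n) := by
  simp [Nat.testBit_two_pow_sub_one]

-- ---- the DP value, as a recursion on the mask ----
def pvF (T : List (List Int)) (n : Nat) (M u f : Nat) : Int :=
  if h : M.testBit u then
    if M = 1 <<< u then (if f = 0 then 1 else 0)
    else
      ∑ v ∈ Finset.range n,
        (if (M ^^^ (1 <<< u)).testBit v then
          (if (T.getD v []).getD u 0 ≠ 0 then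
            (if 1 ≤ f ∧ f ≤ n - 1 then pvF T n (M ^^^ (1 <<< u)) v (f - 1) else 0)
          else (if f < n then pvF T n (M ^^^ (1 <<< u)) v f else 0))
        else 0)
  else 0
termination_by M
decreasing_by all_goals exact pvXorLt h

def pvPartial (T : List (List Int)) (n m M u f : Nat) : Int :=
  if M.testBit u ∧ (M = 1 <<< u ∨ M ^^^ (1 <<< u) < m) then pvF T n M u f else 0

def pvInv (T : List (List Int)) (n m : Nat) (dp : List (List (List Int))) : Prop :=
  pvShape (2 ^ n) n dp ∧
  ∀ M, M < 2 ^ n → ∀ u, u < n → ∀ f, f < n → pvG dp M u f = pvPartial T n m M u f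

-- ---- forward edge count of a sequence ----
def pvFwd (T : List (List Int)) : List Nat → Nat
  | a :: b :: r => (if (T.getD a []).getD b 0 ≠ 0 then 1 else 0) + pvFwd T (b :: r)
  | _ => 0

-- ---- mask of a list ----
def pvMask : List Nat → Nat
  | [] => 0
  | x :: xs => pvMask xs ||| (1 <<< x)

lemma pvMask_tb (l : List Nat) (i : Nat) : (pvMask l).testBit i = decide (i ∈ l) := by
  induction l with
  | nil => simp [pvMask]
  | cons x xs ih =>
    simp only [pvMask, Nat.testBit_or, pvTbPow, ih, List.mem_cons]
    by_cases hxi : x = i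
    · subst hxi; simp
    · simp [hxi, Ne.symm hxi]


lemma pvSumRange (g : Nat → Int) (n : Nat) :
    ((List.range n).map g).sum = ∑ i ∈ Finset.range n, g i := by
  induction n with
  | zero => simp
  | succ k ih => simp [List.range_succ, Finset.sum_range_succ, ih]

-- effect of a 'for f in range(k)' write loop on one target cell
lemma pvWriteFold {N n nm u off : Nat} (a : Nat → Int) (hnm : nm < N) (hu : u < n) :
    ∀ (k : Nat), (∀ f, f < k → off + f < n) → ∀ dp, pvShape N n dp →
      pvShape N n ((List.range k).foldl
        (fun dp f => if a f ≠ 0 then pvBump dp nm u (off + f) (a f) else dp) dp) ∧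
      ∀ M' u' f', M' < N → u' < n → f' < n →
        pvG ((List.range k).foldl
            (fun dp f => if a f ≠ 0 then pvBump dp nm u (off + f) (a f) else dp) dp) M' u' f' =
          pvG dp M' u' f' +
            (if nm = M' ∧ u = u' ∧ off ≤ f' ∧ f' < off + k then a (f' - off) else 0) := by
  intro k
  induction k with
  | zero =>
    intro _ dp hdp
    refine ⟨by simpa using hdp, fun M' u' f' _ _ _ => ?_⟩
    have : ¬(nm = M' ∧ u = u' ∧ off ≤ f' ∧ f' < off + 0) := by omega
    simp [this]
  | succ k ih =>
    intro hk dp hdp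
    have hk' : ∀ f, f < k → off + f < n := fun f hf => hk f (by omega)
    obtain ⟨ihS, ihG⟩ := ih hk' dp hdp
    rw [List.range_succ, List.foldl_append]
    constructor
    · simp only [List.foldl_cons, List.foldl_nil]
      split_ifs with ha
      · exact pvShape_bump ihS nm u (off + k) (a k)
      · exact ihS
    · intro M' u' f' hM' hu' hf'
      simp only [List.foldl_cons, List.foldl_nil]
      by_cases ha : a k ≠ 0
      · rw [if_pos ha, pvG_bump ihS hnm hu (hk k (by omega)) (a k) M' u' f',
          ihG M' u' f' hM' hu' hf']
        by_cases hc : nm = M' ∧ u = u' ∧ off ≤ f' ∧ f' < off + (k + 1)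
        · obtain ⟨h1, h2, h3, h4⟩ := hc
          by_cases h5 : f' < off + k
          · have h7 : ¬(off + k = f') := by omega
            simp [h1, h2, h3, h4, h5, h7]
          · have h6 : off + k = f' := by omega
            have h7 : ¬(nm = M' ∧ u = u' ∧ off ≤ f' ∧ f' < off + k) := by omega
            have h8 : f' - off = k := by omega
            simp [h1, h2, h3, h4, h6, h7, h8]
        · have hc1 : ¬(nm = M' ∧ u = u' ∧ off ≤ f' ∧ f' < off + k) := by
            intro h; exact hc ⟨h.1, h.2.1, h.2.2.1, by omega⟩
          have hc2 : ¬(nm = M' ∧ u = u' ∧ off + k = f') := by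
            intro h; exact hc ⟨h.1, h.2.1, by omega, by omega⟩
          simp [hc, hc1, hc2]
      · rw [if_neg ha, ihG M' u' f' hM' hu' hf']
        have ha0 : a k = 0 := not_ne_iff.mp ha
        by_cases hc : nm = M' ∧ u = u' ∧ off ≤ f' ∧ f' < off + (k + 1)
        · obtain ⟨h1, h2, h3, h4⟩ := hc
          by_cases h5 : f' < off + k
          · simp [h1, h2, h3, h4, h5]
          · have h6 : f' - off = k := by omega
            have : ¬(nm = M' ∧ u = u' ∧ off ≤ f' ∧ f' < off + k) := by omega
            simp [this, h1, h2, h3, h4, h6, ha0]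
        · have hc1 : ¬(nm = M' ∧ u = u' ∧ off ≤ f' ∧ f' < off + k) := by
            intro h; exact hc ⟨h.1, h.2.1, h.2.2.1, by omega⟩
          simp [hc, hc1]


lemma pvFStepF_eq (nm u : Nat) (fv : List Int) :
    pvFStepF nm u fv =
      fun dp f => if fv.getD f 0 ≠ 0 then pvBump dp nm u (1 + f) (fv.getD f 0) else dp := by
  funext dp f
  simp [pvFStepF, Nat.add_comm]

lemma pvFStepB_eq (nm u : Nat) (fv : List Int) :
    pvFStepB nm u fv =
      fun dp f => if fv.getD f 0 ≠ 0 then pvBump dp nm u (0 + f) (fv.getD f 0) else dp := by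
  funext dp f
  simp [pvFStepB]

lemma pvUStep_fold {T : List (List Int)} {N n m v : Nat} {fv : List Int}
    (hN : N = 2 ^ n) (hm : m < N) :
    ∀ L : List Nat, L.Nodup → (∀ x ∈ L, x < n) → ∀ dp, pvShape N n dp →
      pvShape N n (L.foldl (pvUStep T n m v fv) dp) ∧
      ∀ M' u' f', M' < N → u' < n → f' < n →
        pvG (L.foldl (pvUStep T n m v fv) dp) M' u' f' =
          pvG dp M' u' f' +
            (if u' ∈ L ∧ m.testBit u' = false ∧ M' = m ||| (1 <<< u') then
              (if (T.getD v []).getD u' 0 ≠ 0 then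
                (if 1 ≤ f' ∧ f' ≤ n - 1 then fv.getD (f' - 1) 0 else 0)
              else fv.getD f' 0)
            else 0) := by
  intro L
  induction L with
  | nil =>
    intro _ _ dp hdp
    exact ⟨hdp, fun M' u' f' _ _ _ => by simp⟩
  | cons u0 L' ih =>
    intro hnd hlt dp hdp
    obtain ⟨hnotin, hnd'⟩ := List.nodup_cons.mp hnd
    have hu0 : u0 < n := hlt u0 (List.mem_cons_self ..)
    have hlt' : ∀ x ∈ L', x < n := fun x hx => hlt x (List.mem_cons_of_mem _ hx)
    simp only [List.foldl_cons]
    by_cases htb : m.testBit u0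
    · -- bit already in the mask: skipped
      have hskip : pvUStep T n m v fv dp u0 = dp := by
        have hand : m &&& (1 <<< u0) ≠ 0 := by
          intro hc
          rw [(pvAndZero m u0).mp hc] at htb
          exact Bool.false_ne_true htb
        simp [pvUStep, hand]
      rw [hskip]
      obtain ⟨ihS, ihG⟩ := ih hnd' hlt' dp hdp
      refine ⟨ihS, fun M' u' f' hM' hu' hf' => ?_⟩
      rw [ihG M' u' f' hM' hu' hf']
      congr 1
      apply if_congr _ rfl rfl
      constructor
      · rintro ⟨hmem, h2, h3⟩
        exact ⟨List.mem_cons_of_mem _ hmem, h2, h3⟩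
      · rintro ⟨hmem, h2, h3⟩
        rcases List.mem_cons.mp hmem with h | h
        · subst h; rw [h2] at htb; exact absurd htb (by simp)
        · exact ⟨h, h2, h3⟩
    · have htbf : m.testBit u0 = false := by revert htb; cases m.testBit u0 <;> simp
      have hand : m &&& (1 <<< u0) = 0 := (pvAndZero m u0).mpr htbf
      have hnmN : m ||| (1 <<< u0) < N := by rw [hN] at hm ⊢; exact pvOrLt hm hu0
      by_cases hedge : (T.getD v []).getD u0 0 ≠ 0
      · -- forward edge: writes at f+1, f in range(n-1)
        have hstep : pvUStep T n m v fv dp u0 =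
            (List.range (n - 1)).foldl
              (fun dp f => if fv.getD f 0 ≠ 0 then
                pvBump dp (m ||| (1 <<< u0)) u0 (1 + f) (fv.getD f 0) else dp) dp := by
          rw [pvUStep, if_neg (by simp [hand]), if_pos hedge, pvFStepF_eq]
        rw [hstep]
        obtain ⟨wS, wG⟩ :=
          pvWriteFold (off := 1) (fun f => fv.getD f 0) hnmN hu0 (n - 1) (by omega) dp hdp
        obtain ⟨ihS, ihG⟩ := ih hnd' hlt' _ wS
        refine ⟨ihS, fun M' u' f' hM' hu' hf' => ?_⟩
        rw [ihG M' u' f' hM' hu' hf', wG M' u' f' hM' hu' hf']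
        by_cases huu : u' = u0
        · subst huu
          have hC' : ¬(u' ∈ L' ∧ m.testBit u' = false ∧ M' = m ||| (1 <<< u')) :=
            fun hc => hnotin hc.1
          rw [if_neg hC']
          by_cases hM : M' = m ||| (1 <<< u')
          · have hCtrue : u' ∈ u' :: L' ∧ m.testBit u' = false ∧ M' = m ||| (1 <<< u') :=
              ⟨List.mem_cons_self .., htbf, hM⟩
            rw [if_pos hCtrue, if_pos hedge]
            by_cases hf1 : 1 ≤ f'
            · have hW : (m ||| (1 <<< u') = M' ∧ u' = u' ∧ 1 ≤ f' ∧ f' < 1 + (n - 1)) :=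
                ⟨hM.symm, rfl, hf1, by omega⟩
              have hle : 1 ≤ f' ∧ f' ≤ n - 1 := ⟨hf1, by omega⟩
              rw [if_pos hW, if_pos hle]
              ring
            · have hW : ¬(m ||| (1 <<< u') = M' ∧ u' = u' ∧ 1 ≤ f' ∧ f' < 1 + (n - 1)) := by
                rintro ⟨_, _, h, _⟩; exact hf1 h
              have hle : ¬(1 ≤ f' ∧ f' ≤ n - 1) := by rintro ⟨h, _⟩; exact hf1 h
              rw [if_neg hW, if_neg hle]
              ring
          · have hW : ¬(m ||| (1 <<< u') = M' ∧ u' = u' ∧ 1 ≤ f' ∧ f' < 1 + (n - 1)) := by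
              rintro ⟨h, _⟩; exact hM h.symm
            have hC : ¬(u' ∈ u' :: L' ∧ m.testBit u' = false ∧ M' = m ||| (1 <<< u')) := by
              rintro ⟨_, _, h⟩; exact hM h
            rw [if_neg hW, if_neg hC]
            ring
        · have hW : ¬(m ||| (1 <<< u0) = M' ∧ u0 = u' ∧ 1 ≤ f' ∧ f' < 1 + (n - 1)) := by
            rintro ⟨_, h, _⟩; exact huu h.symm
          rw [if_neg hW, add_zero]
          congr 1
          apply if_congr _ rfl rfl
          constructor
          · rintro ⟨hmem, h2, h3⟩
            exact ⟨List.mem_cons_of_mem _ hmem, h2, h3⟩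
          · rintro ⟨hmem, h2, h3⟩
            rcases List.mem_cons.mp hmem with h | h
            · exact absurd h huu
            · exact ⟨h, h2, h3⟩
      · -- no forward edge: writes at f, f in range(n)
        have hstep : pvUStep T n m v fv dp u0 =
            (List.range n).foldl
              (fun dp f => if fv.getD f 0 ≠ 0 then
                pvBump dp (m ||| (1 <<< u0)) u0 (0 + f) (fv.getD f 0) else dp) dp := by
          rw [pvUStep, if_neg (by simp [hand]), if_neg hedge, pvFStepB_eq]
        rw [hstep]
        obtain ⟨wS, wG⟩ :=
          pvWriteFold (off := 0) (fun f => fv.getD f 0) hnmN hu0 n (by omega) dp hdp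
        obtain ⟨ihS, ihG⟩ := ih hnd' hlt' _ wS
        refine ⟨ihS, fun M' u' f' hM' hu' hf' => ?_⟩
        rw [ihG M' u' f' hM' hu' hf', wG M' u' f' hM' hu' hf']
        by_cases huu : u' = u0
        · subst huu
          have hC' : ¬(u' ∈ L' ∧ m.testBit u' = false ∧ M' = m ||| (1 <<< u')) :=
            fun hc => hnotin hc.1
          rw [if_neg hC']
          by_cases hM : M' = m ||| (1 <<< u')
          · have hCtrue : u' ∈ u' :: L' ∧ m.testBit u' = false ∧ M' = m ||| (1 <<< u') :=
              ⟨List.mem_cons_self .., htbf, hM⟩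
            have hW : (m ||| (1 <<< u') = M' ∧ u' = u' ∧ 0 ≤ f' ∧ f' < 0 + n) :=
              ⟨hM.symm, rfl, by omega, by omega⟩
            rw [if_pos hCtrue, if_pos hW, if_neg hedge]
            simp
          · have hW : ¬(m ||| (1 <<< u') = M' ∧ u' = u' ∧ 0 ≤ f' ∧ f' < 0 + n) := by
              rintro ⟨h, _⟩; exact hM h.symm
            have hC : ¬(u' ∈ u' :: L' ∧ m.testBit u' = false ∧ M' = m ||| (1 <<< u')) := by
              rintro ⟨_, _, h⟩; exact hM h
            rw [if_neg hW, if_neg hC]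
            ring
        · have hW : ¬(m ||| (1 <<< u0) = M' ∧ u0 = u' ∧ 0 ≤ f' ∧ f' < 0 + n) := by
            rintro ⟨_, h, _⟩; exact huu h.symm
          rw [if_neg hW, add_zero]
          congr 1
          apply if_congr _ rfl rfl
          constructor
          · rintro ⟨hmem, h2, h3⟩
            exact ⟨List.mem_cons_of_mem _ hmem, h2, h3⟩
          · rintro ⟨hmem, h2, h3⟩
            rcases List.mem_cons.mp hmem with h | h
            · exact absurd h huu
            · exact ⟨h, h2, h3⟩


def pvContrib (T : List (List Int)) (n : Nat) (R : Nat → Nat → Int) (v u f : Nat) : Int :=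
  if (T.getD v []).getD u 0 ≠ 0 then (if 1 ≤ f ∧ f ≤ n - 1 then R v (f - 1) else 0) else R v f

lemma pvXorOr {M u : Nat} (h : M.testBit u = true) : (M ^^^ (1 <<< u)) ||| (1 <<< u) = M := by
  apply Nat.eq_of_testBit_eq
  intro i
  simp only [Nat.testBit_or, Nat.testBit_xor, pvTbPow]
  by_cases hiu : u = i
  · subst hiu; simp [h]
  · simp [hiu]

lemma pvVStep_fold {T : List (List Int)} {N n m : Nat} (hN : N = 2 ^ n) (hm : m < N)
    (R : Nat → Nat → Int) :
    ∀ L : List Nat, (∀ x ∈ L, x < n) → ∀ dp, pvShape N n dp →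
      (∀ v f, v < n → f < n → pvG dp m v f = R v f) →
      pvShape N n (L.foldl (pvVStep T n m) dp) ∧
      ∀ M' u' f', M' < N → u' < n → f' < n →
        pvG (L.foldl (pvVStep T n m) dp) M' u' f' =
          pvG dp M' u' f' +
            (if m.testBit u' = false ∧ M' = m ||| (1 <<< u') then
              (L.map (fun v => if m.testBit v then pvContrib T n R v u' f' else 0)).sum
            else 0) := by
  intro L
  induction L with
  | nil =>
    intro _ dp hdp _
    exact ⟨hdp, fun M' u' f' _ _ _ => by simp⟩
  | cons v0 L' ih =>
    intro hlt dp hdp hrow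
    have hv0 : v0 < n := hlt v0 (List.mem_cons_self ..)
    have hlt' : ∀ x ∈ L', x < n := fun x hx => hlt x (List.mem_cons_of_mem _ hx)
    simp only [List.foldl_cons]
    by_cases htb : m.testBit v0
    · -- v0 is in the mask: inner u-loop runs
      have hne : ¬((m &&& (1 <<< v0)) == 0) := by
        simp only [beq_iff_eq, pvAndZero]
        simp [htb]
      have hstep : pvVStep T n m dp v0 =
          (List.range n).foldl (pvUStep T n m v0 ((dp.getD m []).getD v0 [])) dp := by
        rw [pvVStep, if_neg hne]
      rw [hstep]
      obtain ⟨uS, uG⟩ :=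
        pvUStep_fold hN hm (List.range n) (List.nodup_range) (fun x hx => List.mem_range.mp hx)
          dp hdp
      have hstab : ∀ v f, v < n → f < n →
          pvG ((List.range n).foldl (pvUStep T n m v0 ((dp.getD m []).getD v0 [])) dp) m v f =
            R v f := by
        intro v f hv hf
        rw [uG m v f hm hv hf]
        have : ¬(v ∈ List.range n ∧ m.testBit v = false ∧ m = m ||| (1 <<< v)) := by
          rintro ⟨_, htbf, heq⟩
          exact pvOrNe htbf heq.symm
        rw [if_neg this, add_zero]
        exact hrow v f hv hf
      obtain ⟨ihS, ihG⟩ := ih hlt' _ uS hstab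
      refine ⟨ihS, fun M' u' f' hM' hu' hf' => ?_⟩
      rw [ihG M' u' f' hM' hu' hf', uG M' u' f' hM' hu' hf']
      have hval : (if (T.getD v0 []).getD u' 0 ≠ 0 then
          (if 1 ≤ f' ∧ f' ≤ n - 1 then ((dp.getD m []).getD v0 []).getD (f' - 1) 0 else 0)
        else ((dp.getD m []).getD v0 []).getD f' 0) = pvContrib T n R v0 u' f' := by
        rw [pvContrib]
        have e1 : ((dp.getD m []).getD v0 []).getD (f' - 1) 0 = R v0 (f' - 1) :=
          hrow v0 (f' - 1) hv0 (by omega)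
        have e2 : ((dp.getD m []).getD v0 []).getD f' 0 = R v0 f' := hrow v0 f' hv0 hf'
        rw [e1, e2]
      rw [hval]
      by_cases hc : m.testBit u' = false ∧ M' = m ||| (1 <<< u')
      · obtain ⟨htbf', hMeq⟩ := hc
        have hcons : u' ∈ List.range n ∧ m.testBit u' = false ∧ M' = m ||| (1 <<< u') :=
          ⟨List.mem_range.mpr hu', htbf', hMeq⟩
        rw [if_pos hcons, if_pos ⟨htbf', hMeq⟩, if_pos ⟨htbf', hMeq⟩]
        simp [htb]
        ring
      · have hcons : ¬(u' ∈ List.range n ∧ m.testBit u' = false ∧ M' = m ||| (1 <<< u')) := by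
          rintro ⟨_, h2, h3⟩; exact hc ⟨h2, h3⟩
        rw [if_neg hcons, if_neg hc, if_neg hc]
        ring
    · -- v0 not in the mask: skipped
      have hskip : pvVStep T n m dp v0 = dp := by
        have htbf : m.testBit v0 = false := by revert htb; cases m.testBit v0 <;> simp
        rw [pvVStep, if_pos (by simp [(pvAndZero m v0).mpr htbf])]
      rw [hskip]
      obtain ⟨ihS, ihG⟩ := ih hlt' dp hdp hrow
      refine ⟨ihS, fun M' u' f' hM' hu' hf' => ?_⟩
      rw [ihG M' u' f' hM' hu' hf']
      have htbf : m.testBit v0 = false := by revert htb; cases m.testBit v0 <;> simp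
      simp only [List.map_cons, List.sum_cons, htbf, Bool.false_eq_true, if_false, zero_add]

lemma pvStep {T : List (List Int)} {n m : Nat} (h1 : 1 ≤ m) (hm : m < 2 ^ n)
    (dp : List (List (List Int))) (hInv : pvInv T n m dp) :
    pvInv T n (m + 1) (pvMaskStep T n dp m) := by
  obtain ⟨hS, hG⟩ := hInv
  have hrow : ∀ v f, v < n → f < n → pvG dp m v f = pvPartial T n m m v f :=
    fun v f hv hf => hG m hm v hv f hf
  obtain ⟨vS, vG⟩ := pvVStep_fold rfl hm (pvPartial T n m m) (List.range n)
    (fun x hx => List.mem_range.mp hx) dp hS hrow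
  refine ⟨vS, fun M hM u hu f hf => ?_⟩
  rw [pvMaskStep, vG M u f hM hu hf, hG M hM u hu f hf]
  by_cases hc : m.testBit u = false ∧ M = m ||| (1 <<< u)
  · obtain ⟨htbf, hMeq⟩ := hc
    subst hMeq
    have hMtb : (m ||| (1 <<< u)).testBit u = true := by
      simp [Nat.testBit_or, pvTbPow]
    have hxor : (m ||| (1 <<< u)) ^^^ (1 <<< u) = m := pvOrXor htbf
    have hnotsing : m ||| (1 <<< u) ≠ 1 <<< u := by
      intro hcon
      have hm0 : m = 0 := by
        apply Nat.eq_of_testBit_eq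
        intro i
        simp only [Nat.zero_testBit]
        by_cases hmi : m.testBit i
        · have : (m ||| (1 <<< u)).testBit i = true := by
            simp [Nat.testBit_or, hmi]
          rw [hcon, pvTbPow] at this
          have hui : u = i := by simpa using this
          rw [← hui] at hmi
          rw [htbf] at hmi
          exact absurd hmi (by simp)
        · revert hmi; cases m.testBit i <;> simp
      omega
    have hold : pvPartial T n m (m ||| (1 <<< u)) u f = 0 := by
      rw [pvPartial, if_neg]
      rintro ⟨_, hsing | hlt⟩
      · exact hnotsing hsing
      · rw [hxor] at hlt; omega
    have hnew : pvPartial T n (m + 1) (m ||| (1 <<< u)) u f =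
        pvF T n (m ||| (1 <<< u)) u f := by
      rw [pvPartial, if_pos ⟨hMtb, Or.inr (by rw [hxor]; omega)⟩]
    rw [if_pos ⟨htbf, rfl⟩, hold, hnew, zero_add]
    conv_rhs => rw [pvF]
    rw [dif_pos hMtb, if_neg hnotsing, hxor, pvSumRange]
    apply Finset.sum_congr rfl
    intro v _
    by_cases htv : m.testBit v
    · have hR1 : pvPartial T n m m v (f - 1) = pvF T n m v (f - 1) := by
        rw [pvPartial, if_pos ⟨htv, Or.inr (pvXorLt htv)⟩]
      have hR2 : pvPartial T n m m v f = pvF T n m v f := by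
        rw [pvPartial, if_pos ⟨htv, Or.inr (pvXorLt htv)⟩]
      simp [htv, pvContrib, hR1, hR2, hf]
    · simp [htv]
  · rw [if_neg hc, add_zero]
    by_cases hMtb : M.testBit u
    · by_cases hsing : M = 1 <<< u
      · simp [pvPartial, hMtb, hsing]
      · by_cases hxm : M ^^^ (1 <<< u) = m
        · exfalso
          apply hc
          constructor
          · rw [← hxm]
            simp [Nat.testBit_xor, pvTbPow, hMtb]
          · rw [← hxm]
            exact (pvXorOr hMtb).symm
        · have hiff : (M ^^^ (1 <<< u) < m) ↔ (M ^^^ (1 <<< u) < m + 1) := by omega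
          simp [pvPartial, hMtb, hsing, hiff]
    · simp [pvPartial, hMtb]

lemma pvSet1_fold {N n : Nat} :
    ∀ L : List Nat, (∀ x ∈ L, x < n) → (∀ x ∈ L, 1 <<< x < N) → ∀ dp, pvShape N n dp →
      pvShape N n (L.foldl (fun dp v => pvSet1 dp (1 <<< v) v 0) dp) ∧
      ∀ M u f, M < N → u < n → f < n →
        pvG (L.foldl (fun dp v => pvSet1 dp (1 <<< v) v 0) dp) M u f =
          if u ∈ L ∧ M = 1 <<< u ∧ f = 0 then 1 else pvG dp M u f := by
  intro L
  induction L with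
  | nil =>
    intro _ _ dp hdp
    exact ⟨hdp, fun M u f _ _ _ => by simp⟩
  | cons v0 L' ih =>
    intro hlt hpow dp hdp
    have hv0 : v0 < n := hlt v0 (List.mem_cons_self ..)
    have hp0 : 1 <<< v0 < N := hpow v0 (List.mem_cons_self ..)
    have hn0 : 0 < n := by omega
    simp only [List.foldl_cons]
    obtain ⟨ihS, ihG⟩ := ih (fun x hx => hlt x (List.mem_cons_of_mem _ hx))
      (fun x hx => hpow x (List.mem_cons_of_mem _ hx)) _ (pvShape_set1 hdp (1 <<< v0) v0 0)
    refine ⟨ihS, fun M u f hM hu hf => ?_⟩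
    rw [ihG M u f hM hu hf, pvG_set1 hdp hp0 hv0 hn0 M u f]
    by_cases hcL : u ∈ L' ∧ M = 1 <<< u ∧ f = 0
    · rw [if_pos hcL, if_pos ⟨List.mem_cons_of_mem _ hcL.1, hcL.2⟩]
    · rw [if_neg hcL]
      by_cases hcv : v0 = u ∧ M = 1 <<< u ∧ f = 0
      · obtain ⟨h1, h2, h3⟩ := hcv
        subst h1
        rw [if_pos ⟨h2.symm, rfl, h3.symm⟩, if_pos ⟨List.mem_cons_self .., h2, h3⟩]
      · have hA : ¬(1 <<< v0 = M ∧ v0 = u ∧ 0 = f) := by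
          rintro ⟨a1, a2, a3⟩; exact hcv ⟨a2, by rw [← a1, a2], a3.symm⟩
        have hB : ¬(u ∈ v0 :: L' ∧ M = 1 <<< u ∧ f = 0) := by
          rintro ⟨hmem, b2, b3⟩
          rcases List.mem_cons.mp hmem with h | h
          · exact hcv ⟨h.symm, b2, b3⟩
          · exact hcL ⟨h, b2, b3⟩
        rw [if_neg hA, if_neg hB]

lemma pvCube {n : Nat} :
    pvShape (2 ^ n) n
      (List.replicate (2 ^ n) (List.replicate n (List.replicate n (0 : Int)))) ∧
    ∀ M u f, pvG (List.replicate (2 ^ n) (List.replicate n (List.replicate n (0 : Int)))) M u f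
      = 0 := by
  constructor
  · refine ⟨by simp, fun M hM => ?_⟩
    rw [List.getD_replicate _ hM]
    exact ⟨by simp, fun u hu => by rw [List.getD_replicate _ hu]; simp⟩
  · intro M u f
    have hrep : ∀ {α : Type} (k : Nat) (x y : α) (i : Nat),
        (List.replicate k x).getD i y = if i < k then x else y := by
      intro α k x y i
      by_cases h : i < k
      · rw [List.getD_replicate _ h, if_pos h]
      · rw [if_neg h, List.getD_eq_getElem?_getD,
          List.getElem?_eq_none (by simp; omega)]
        simp
    rw [pvG, hrep]
    split_ifs with h1
    · rw [hrep]
      split_ifs with h2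
      · rw [hrep]
        split_ifs with h3 <;> simp
      · simp
    · simp

lemma pvInit {T : List (List Int)} {n : Nat} :
    pvInv T n 1 ((List.range n).foldl (fun dp v => pvSet1 dp (1 <<< v) v 0)
      (List.replicate (2 ^ n) (List.replicate n (List.replicate n (0 : Int))))) := by
  obtain ⟨hS0, hG0⟩ := pvCube (n := n)
  obtain ⟨hS, hG⟩ := pvSet1_fold (List.range n) (fun x hx => List.mem_range.mp hx)
    (fun x hx => pvPowLt (List.mem_range.mp hx)) _ hS0
  refine ⟨hS, fun M hM u hu f hf => ?_⟩
  rw [hG M u f hM hu hf, hG0 M u f, pvPartial]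
  by_cases hsing : M = 1 <<< u
  · subst hsing
    have htb : (1 <<< u).testBit u = true := by simp [pvTbPow]
    by_cases hf0 : f = 0
    · rw [if_pos ⟨List.mem_range.mpr hu, rfl, hf0⟩, if_pos ⟨htb, Or.inl rfl⟩, pvF,
        dif_pos htb, if_pos rfl, if_pos hf0]
    · rw [if_neg (fun hcon => hf0 hcon.2.2), if_pos ⟨htb, Or.inl rfl⟩, pvF,
        dif_pos htb, if_pos rfl, if_neg hf0]
  · rw [if_neg (by rintro ⟨_, h, _⟩; exact hsing h), if_neg]
    rintro ⟨htb, hsing2 | hxl⟩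
    · exact hsing hsing2
    · have hx0 : M ^^^ (1 <<< u) = 0 := by omega
      exact hsing (Nat.xor_eq_zero.mp hx0)

lemma pvChain {T : List (List Int)} {n : Nat} {dp : List (List (List Int))}
    (h : pvInv T n 1 dp) :
    ∀ k, 1 + k ≤ 2 ^ n → pvInv T n (1 + k) ((List.range' 1 k).foldl (pvMaskStep T n) dp) := by
  intro k
  induction k with
  | zero => intro _; simpa using h
  | succ k ih =>
    intro hk
    rw [List.range'_concat, List.foldl_append]
    simp only [List.foldl_cons, List.foldl_nil, one_mul]
    rw [show 1 + (k + 1) = (1 + k) + 1 by omega]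
    exact pvStep (by omega) (by omega) _ (ih (by omega))

lemma pvNfRow (c : Nat → Int) :
    ∀ (k : Nat) (Nf : List Int),
      ((List.range k).foldl (fun Nf f => Nf.modify f (fun x => x + c f)) Nf).length = Nf.length ∧
      ∀ j, ((List.range k).foldl (fun Nf f => Nf.modify f (fun x => x + c f)) Nf).getD j 0 =
        Nf.getD j 0 + (if j < k ∧ j < Nf.length then c j else 0) := by
  intro k
  induction k with
  | zero =>
    intro Nf
    refine ⟨rfl, fun j => ?_⟩
    have : ¬(j < 0 ∧ j < Nf.length) := by omega
    simp [this]
  | succ k ih =>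
    intro Nf
    obtain ⟨ihL, ihG⟩ := ih Nf
    rw [List.range_succ, List.foldl_append]
    simp only [List.foldl_cons, List.foldl_nil]
    constructor
    · rw [List.length_modify, ihL]
    · intro j
      rw [pvGetD_modify, ihL, ihG j]
      by_cases hkj : k = j
      · subst hkj
        have h1 : ¬(k < k ∧ k < Nf.length) := by omega
        by_cases h2 : k < Nf.length
        · have h3 : k < k + 1 ∧ k < Nf.length := by omega
          simp [h1, h2, h3]
        · have h3 : ¬(k < k + 1 ∧ k < Nf.length) := by omega
          simp [h1, h2, h3]
      · have hiff : (j < k + 1 ∧ j < Nf.length) ↔ (j < k ∧ j < Nf.length) := by omega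
        simp [hkj, hiff]
        have h4 : (j ≤ k ∧ j < Nf.length) ↔ (j < k ∧ j < Nf.length) := by omega
        rw [if_congr h4 rfl rfl]

lemma pvNfSum (g : Nat → Nat → Int) (n : Nat) :
    ∀ (L : List Nat) (Nf : List Int),
      ((L.foldl (fun Nf v => (List.range n).foldl
          (fun Nf f => Nf.modify f (fun x => x + g v f)) Nf) Nf).length = Nf.length) ∧
      ∀ j, (L.foldl (fun Nf v => (List.range n).foldl
          (fun Nf f => Nf.modify f (fun x => x + g v f)) Nf) Nf).getD j 0 =
        Nf.getD j 0 + (if j < n ∧ j < Nf.length then (L.map (fun v => g v j)).sum else 0) := by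
  intro L
  induction L with
  | nil =>
    intro Nf
    refine ⟨rfl, fun j => ?_⟩
    simp
  | cons v0 L' ih =>
    intro Nf
    simp only [List.foldl_cons]
    obtain ⟨rL, rG⟩ := pvNfRow (g v0) n Nf
    obtain ⟨ihL, ihG⟩ := ih ((List.range n).foldl (fun Nf f => Nf.modify f (fun x => x + g v0 f)) Nf)
    refine ⟨by rw [ihL, rL], fun j => ?_⟩
    rw [ihG j, rL, rG j]
    by_cases hc : j < n ∧ j < Nf.length
    · simp only [List.map_cons, List.sum_cons, if_pos hc]
      ring
    · simp [hc]

lemma pvCountFold (h : List Nat → Nat) :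
    ∀ (L : List (List Nat)) (Nf : List Int), (∀ p ∈ L, h p < Nf.length) →
      ((L.foldl (fun Nf p => Nf.modify (h p) (fun x => x + 1)) Nf).length = Nf.length) ∧
      ∀ j, j < Nf.length →
        (L.foldl (fun Nf p => Nf.modify (h p) (fun x => x + 1)) Nf).getD j 0 =
          Nf.getD j 0 + (L.countP (fun p => h p = j) : Int) := by
  intro L
  induction L with
  | nil => intro Nf _; exact ⟨rfl, fun j _ => by simp⟩
  | cons p0 L' ih =>
    intro Nf hB
    simp only [List.foldl_cons]
    obtain ⟨ihL, ihG⟩ := ih (Nf.modify (h p0) (fun x => x + 1))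
      (fun p hp => by rw [List.length_modify]; exact hB p (List.mem_cons_of_mem _ hp))
    rw [List.length_modify] at ihL
    refine ⟨ihL, fun j hj => ?_⟩
    rw [ihG j (by rw [List.length_modify]; exact hj), pvGetD_modify, List.countP_cons]
    by_cases hc : h p0 = j
    · rw [if_pos ⟨hc, hj⟩]
      simp [hc]
      push_cast
      ring
    · rw [if_neg (fun hcon => hc hcon.1)]
      simp [hc]

lemma pvAccCount (P : Nat → Prop) [DecidablePred P] :
    ∀ (k a : Nat), (List.range k).foldl (fun f i => if P i then f + 1 else f) a =
      a + (List.range k).countP (fun i => decide (P i)) := by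
  intro k
  induction k with
  | zero => intro a; simp
  | succ k ih =>
    intro a
    rw [List.range_succ, List.foldl_append, List.countP_append]
    simp only [List.foldl_cons, List.foldl_nil, List.countP_cons, List.countP_nil]
    by_cases hp : P k
    · rw [if_pos hp, ih]
      simp [hp]
      omega
    · rw [if_neg hp, ih]
      simp [hp]

lemma pvCntFwd (T : List (List Int)) :
    ∀ (q : List Nat),
      (List.range (q.length - 1)).countP
        (fun i => decide ((T.getD (q.getD i 0) []).getD (q.getD (i + 1) 0) 0 ≠ 0)) =
      pvFwd T q := by
  intro q
  induction q with
  | nil => simp [pvFwd]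
  | cons a t ih =>
    match t, ih with
    | [], _ => simp [pvFwd]
    | b :: r, ih =>
      have hlen : (a :: b :: r).length - 1 = (b :: r).length - 1 + 1 := by
        simp
      rw [hlen, List.range_succ_eq_map, List.countP_cons]
      simp only [List.countP_map]
      have hcomp : ((fun i => decide ((T.getD ((a :: b :: r).getD i 0) []).getD
            ((a :: b :: r).getD (i + 1) 0) 0 ≠ 0)) ∘ Nat.succ) =
          (fun i => decide ((T.getD ((b :: r).getD i 0) []).getD
            ((b :: r).getD (i + 1) 0) 0 ≠ 0)) := by
        funext i
        simp [Function.comp, List.getD_cons_succ]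
      rw [hcomp, ih]
      simp only [List.getD_cons_zero, List.getD_cons_succ]
      show pvFwd T (b :: r) + (if decide ((T.getD a []).getD b 0 ≠ 0) = true then 1 else 0) =
        (if (T.getD a []).getD b 0 ≠ 0 then 1 else 0) + pvFwd T (b :: r)
      by_cases he : (T.getD a []).getD b 0 ≠ 0
      · rw [if_pos (decide_eq_true he), if_pos he]
        omega
      · rw [if_neg (fun hc => he (of_decide_eq_true hc)), if_neg he]
        omega

lemma pvFwd_snoc_snoc (T : List (List Int)) (u v : Nat) :
    ∀ q : List Nat, pvFwd T (q ++ [u, v]) =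
      pvFwd T (q ++ [u]) + (if (T.getD u []).getD v 0 ≠ 0 then 1 else 0) := by
  intro q
  induction q with
  | nil => simp [pvFwd]
  | cons a q ih =>
    match q, ih with
    | [], _ =>
      show ((if (T.getD a []).getD u 0 ≠ 0 then 1 else 0) + pvFwd T (u :: [v])) =
        ((if (T.getD a []).getD u 0 ≠ 0 then 1 else 0) + pvFwd T (u :: [])) +
          (if (T.getD u []).getD v 0 ≠ 0 then 1 else 0)
      simp only [pvFwd]
      ring
    | b :: q', ih =>
      simp only [List.cons_append, pvFwd] at ih ⊢
      rw [ih]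
      ring

lemma pvFwd_lt (T : List (List Int)) : ∀ q : List Nat, q ≠ [] → pvFwd T q < q.length := by
  intro q
  induction q with
  | nil => intro h; exact absurd rfl h
  | cons a t ih =>
    intro _
    match t, ih with
    | [], _ => simp [pvFwd]
    | b :: r, ih =>
      have hlt := ih (by simp)
      show ((if (T.getD a []).getD b 0 ≠ 0 then 1 else 0) + pvFwd T (b :: r)) <
        (a :: b :: r).length
      have hlen : (a :: b :: r).length = (b :: r).length + 1 := by simp
      by_cases he : (T.getD a []).getD b 0 ≠ 0
      · rw [if_pos he]; omega
      · rw [if_neg he]; omega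

lemma pvFoldlAttach {α β : Type} (l : List α) (g : α → List β) :
    ∀ acc, l.attach.foldl (fun out vp => out ++ g vp.1) acc = acc ++ l.flatMap g := by
  induction l with
  | nil => intro acc; simp
  | cons a t ih =>
    intro acc
    rw [List.attach_cons, List.foldl_cons, List.foldl_map, ih]
    simp

lemma pvPermsLast_flat (l : List Nat) (h : l ≠ []) :
    pvPermsLast l = l.flatMap (fun v =>
      (pvPermsLast (l.filter (fun x => x != v))).map (fun q => q ++ [v])) := by
  rw [pvPermsLast, if_neg h]
  simpa using pvFoldlAttach l
    (fun v => (pvPermsLast (l.filter (fun x => x != v))).map (fun q => q ++ [v])) []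

lemma pvPermsLast_len :
    ∀ (k : Nat) (l : List Nat), l.length ≤ k → l.Nodup →
      ∀ q ∈ pvPermsLast l, q.length = l.length := by
  intro k
  induction k with
  | zero =>
    intro l hl _ q hq
    have h0 : l = [] := List.length_eq_zero_iff.mp (by omega)
    subst h0
    rw [pvPermsLast] at hq
    simp at hq
    simp [hq]
  | succ k ih =>
    intro l hl hnd q hq
    by_cases h0 : l = []
    · subst h0
      rw [pvPermsLast] at hq
      simp at hq
      simp [hq]
    · rw [pvPermsLast_flat l h0] at hq
      obtain ⟨v, hv, hq2⟩ := List.mem_flatMap.mp hq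
      obtain ⟨q', hq', rfl⟩ := List.mem_map.mp hq2
      rw [← List.Nodup.erase_eq_filter hnd v] at hq'
      have hlen : (l.erase v).length = l.length - 1 := List.length_erase_of_mem hv
      have h1 : l.length ≥ 1 := List.length_pos_of_ne_nil h0
      have := ih (l.erase v) (by omega) (hnd.erase v) q' hq'
      simp [this, hlen]
      omega

lemma pvMask_erase {l : List Nat} {v : Nat} (hnd : l.Nodup) (hv : v ∈ l) :
    pvMask (l.erase v) = pvMask l ^^^ (1 <<< v) := by
  apply Nat.eq_of_testBit_eq
  intro i
  rw [pvMask_tb, Nat.testBit_xor, pvMask_tb, pvTbPow]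
  by_cases hiv : i = v
  · subst hiv
    simp [List.Nodup.mem_erase_iff hnd, hv]
  · have hvi : (v = i) = False := by
      apply eq_false
      exact fun h => hiv h.symm
    simp [List.Nodup.mem_erase_iff hnd, hiv, hvi]

lemma pvMask_range (n : Nat) : pvMask (List.range n) = 2 ^ n - 1 := by
  apply Nat.eq_of_testBit_eq
  intro i
  rw [pvMask_tb, pvTbFull]
  simp [List.mem_range]

lemma pvLemB (T : List (List Int)) (n : Nat) :
    ∀ (k : Nat) (l : List Nat), l.length ≤ k → l.Nodup → (∀ x ∈ l, x < n) →
      ∀ v ∈ l, ∀ f, f < n →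
      pvF T n (pvMask l) v f =
        (((pvPermsLast (l.erase v)).countP (fun q => pvFwd T (q ++ [v]) = f) : Nat) : Int) := by
  intro k
  induction k with
  | zero =>
    intro l hl _ _ v hv
    have h0 : l = [] := List.length_eq_zero_iff.mp (by omega)
    subst h0; simp at hv
  | succ k ih =>
    intro l hl hnd hb v hv f hf
    by_cases hbase : l.erase v = []
    · -- l is the singleton [v]
      have hsingl : l = [v] := by
        have h1 : l.length = 1 := by
          have h2 := List.length_erase_of_mem hv
          rw [hbase] at h2
          have h3 : 1 ≤ l.length := List.length_pos_of_ne_nil (by rintro rfl; simp at hv)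
          simp at h2; omega
        obtain ⟨x, rfl⟩ := List.length_eq_one_iff.mp h1
        simp at hv; rw [hv]
      subst hsingl
      have hmask : pvMask [v] = 1 <<< v := by simp [pvMask]
      have htb : (1 <<< v).testBit v = true := by simp [pvTbPow]
      rw [hmask, pvF, dif_pos htb, if_pos rfl]
      have herase : ([v] : List Nat).erase v = [] := by simp
      have hp : pvPermsLast [] = [[]] := by rw [pvPermsLast]; simp
      rw [herase, hp]
      have hfwd1 : pvFwd T [v] = 0 := rfl
      by_cases hf0 : f = 0
      · subst hf0; simp [List.countP_cons, hfwd1]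
      · have hnp : ¬(pvFwd T [v] = f) := by rw [hfwd1]; omega
        simp [List.countP_cons, hnp, hf0]
    · -- at least two elements
      have hnd' := hnd.erase v
      have hb' : ∀ x ∈ l.erase v, x < n := fun x hx => hb x (List.mem_of_mem_erase hx)
      have hlenr : (l.erase v).length = l.length - 1 := List.length_erase_of_mem hv
      have hl1 : 1 ≤ l.length := List.length_pos_of_ne_nil (by rintro rfl; simp at hv)
      have hlen' : (l.erase v).length ≤ k := by omega
      have htbv : (pvMask l).testBit v = true := by rw [pvMask_tb]; simp [hv]
      have hne : pvMask l ≠ 1 <<< v := by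
        intro hcon
        obtain ⟨u0, hu0⟩ := List.exists_mem_of_ne_nil _ hbase
        have h1 : u0 ∈ l := List.mem_of_mem_erase hu0
        have h2 : u0 ≠ v := ((List.Nodup.mem_erase_iff hnd).mp hu0).1
        have h3 : (pvMask l).testBit u0 = true := by rw [pvMask_tb]; simp [h1]
        rw [hcon, pvTbPow] at h3
        have h4 : v = u0 := by simpa using h3
        exact h2 h4.symm
      rw [pvF, dif_pos htbv, if_neg hne, ← pvMask_erase hnd hv]
      rw [pvPermsLast_flat _ hbase, List.countP_flatMap, Nat.cast_list_sum, List.map_map]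
      have hsub : (l.erase v).toFinset ⊆ Finset.range n := by
        intro x hx
        exact Finset.mem_range.mpr (hb' x (List.mem_toFinset.mp hx))
      have hfin : (∑ u ∈ Finset.range n,
            if (pvMask (l.erase v)).testBit u then
              (if (T.getD u []).getD v 0 ≠ 0 then
                (if 1 ≤ f ∧ f ≤ n - 1 then pvF T n (pvMask (l.erase v)) u (f - 1) else 0)
              else (if f < n then pvF T n (pvMask (l.erase v)) u f else 0))
            else 0) =
          ((l.erase v).map (fun u =>
            (if (T.getD u []).getD v 0 ≠ 0 then
              (if 1 ≤ f ∧ f ≤ n - 1 then pvF T n (pvMask (l.erase v)) u (f - 1) else 0)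
            else (if f < n then pvF T n (pvMask (l.erase v)) u f else 0)))).sum := by
        calc _ = ∑ u ∈ Finset.range n, if u ∈ (l.erase v).toFinset then
                (if (T.getD u []).getD v 0 ≠ 0 then
                  (if 1 ≤ f ∧ f ≤ n - 1 then pvF T n (pvMask (l.erase v)) u (f - 1) else 0)
                else (if f < n then pvF T n (pvMask (l.erase v)) u f else 0)) else 0 := by
              apply Finset.sum_congr rfl
              intro u _
              rw [pvMask_tb]
              by_cases hu : u ∈ l.erase v <;> simp [hu]
          _ = _ := by
              rw [Finset.sum_ite_mem, Finset.inter_eq_right.mpr hsub]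
              exact List.sum_toFinset _ hnd'
      rw [hfin]
      apply congrArg List.sum
      apply List.map_congr_left
      intro u hu
      simp only [Function.comp]
      rw [List.countP_map, ← List.Nodup.erase_eq_filter hnd' u]
      have hsnoc : ∀ q : List Nat, pvFwd T ((q ++ [u]) ++ [v]) =
          pvFwd T (q ++ [u]) + (if (T.getD u []).getD v 0 ≠ 0 then 1 else 0) := by
        intro q
        rw [List.append_assoc]
        exact pvFwd_snoc_snoc T u v q
      by_cases hedge : (T.getD u []).getD v 0 ≠ 0
      · rw [if_pos hedge]
        by_cases hf1 : 1 ≤ f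
        · rw [if_pos ⟨hf1, by omega⟩, ih (l.erase v) hlen' hnd' hb' u hu (f - 1) (by omega)]
          congr 1
          apply List.countP_congr
          intro q _
          simp only [Function.comp, decide_eq_true_eq]
          rw [hsnoc q, if_pos hedge]
          omega
        · rw [if_neg (fun hc => hf1 hc.1)]
          have hcz : (pvPermsLast ((l.erase v).erase u)).countP
              ((fun q => decide (pvFwd T (q ++ [v]) = f)) ∘ (fun q => q ++ [u])) = 0 := by
            apply List.countP_eq_zero.mpr
            intro q _
            simp only [Function.comp, decide_eq_true_eq]
            rw [hsnoc q, if_pos hedge]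
            omega
          rw [hcz]
          simp
      · rw [if_neg hedge, if_pos hf, ih (l.erase v) hlen' hnd' hb' u hu f hf]
        congr 1
        apply List.countP_congr
        intro q _
        simp only [Function.comp, decide_eq_true_eq]
        rw [hsnoc q, if_neg hedge]
        omega
-- ===== VERDICT (by name: the statement is the Claim_ definition above) =====
theorem compute_H_and_Nf_dp_spec : Claim_equal_compute_H_and_Nf_dp := by
  intro T _ hPre
  obtain ⟨hne0, _⟩ := hPre
  show compute_H_and_Nf_dp T = compute_H_and_Nf_dp_alt T
  have hsh : (1 : Nat) <<< T.length = 2 ^ T.length := by rw [Nat.shiftLeft_eq, one_mul]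
  simp only [compute_H_and_Nf_dp, compute_H_and_Nf_dp_alt, hsh]
  set n := T.length with hndef
  have hn1 : 1 ≤ n := List.length_pos_of_ne_nil hne0
  have hpow1 : 1 ≤ 2 ^ n := Nat.one_le_two_pow
  set dpI := (List.range n).foldl (fun dp v => pvSet1 dp (1 <<< v) v 0)
    (List.replicate (2 ^ n) (List.replicate n (List.replicate n (0 : Int)))) with hdpI
  set dp2 := (List.range' 1 (2 ^ n - 1)).foldl (pvMaskStep T n) dpI with hdp2
  have hInvN : pvInv T n (2 ^ n) dp2 := by
    have := pvChain (pvInit (T := T) (n := n)) (2 ^ n - 1) (by omega)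
    rw [show 1 + (2 ^ n - 1) = 2 ^ n by omega] at this
    exact this
  obtain ⟨hS2, hG2⟩ := hInvN
  have hfullG : ∀ v f, v < n → f < n →
      pvG dp2 (2 ^ n - 1) v f = pvF T n (2 ^ n - 1) v f := by
    intro v f hv hf
    rw [hG2 (2 ^ n - 1) (by omega) v hv f hf, pvPartial]
    have htb : (2 ^ n - 1).testBit v = true := by rw [pvTbFull]; simp [hv]
    exact if_pos ⟨htb, Or.inr (lt_trans (pvXorLt htb) (by omega))⟩
  -- A-side Nf characterisation
  obtain ⟨hAL, hAG⟩ := pvNfSum (fun v f => ((dp2.getD (2 ^ n - 1) []).getD v []).getD f 0) n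
    (List.range n) (List.replicate n (0 : Int))
  -- B-side: permutations facts
  have hperm_len : ∀ p ∈ pvPermsLast (List.range n), p.length = n := by
    intro p hp
    have := pvPermsLast_len n (List.range n) (by simp) List.nodup_range p hp
    simpa using this
  have hh : ∀ p ∈ pvPermsLast (List.range n),
      (List.range (n - 1)).foldl (fun f i =>
        if (T.getD (p.getD i 0) []).getD (p.getD (i + 1) 0) 0 ≠ 0 then f + 1 else f) 0 =
      pvFwd T p := by
    intro p hp
    rw [pvAccCount (fun i => (T.getD (p.getD i 0) []).getD (p.getD (i + 1) 0) 0 ≠ 0) (n - 1) 0,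
      show n - 1 = p.length - 1 by rw [hperm_len p hp], pvCntFwd]
    omega
  have hperm_ne : ∀ p ∈ pvPermsLast (List.range n), p ≠ [] := by
    intro p hp hcon
    have := hperm_len p hp
    rw [hcon] at this
    simp at this
    omega
  have hfwd_lt : ∀ p ∈ pvPermsLast (List.range n), pvFwd T p < n := by
    intro p hp
    have h1 := pvFwd_lt T p (hperm_ne p hp)
    rw [hperm_len p hp] at h1
    exact h1
  obtain ⟨hBL, hBG⟩ := pvCountFold (fun p => (List.range (n - 1)).foldl (fun f i =>
      if (T.getD (p.getD i 0) []).getD (p.getD (i + 1) 0) 0 ≠ 0 then f + 1 else f) 0)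
    (pvPermsLast (List.range n)) (List.replicate n (0 : Int))
    (by
      intro p hp
      show (List.range (n - 1)).foldl (fun f i =>
          if (T.getD (p.getD i 0) []).getD (p.getD (i + 1) 0) 0 ≠ 0 then f + 1 else f) 0 <
        (List.replicate n (0 : Int)).length
      rw [hh p hp, List.length_replicate]
      exact hfwd_lt p hp)
  -- the two Nf lists agree
  have hAB : ∀ j, j < n →
      ((List.range n).map (fun v => ((dp2.getD (2 ^ n - 1) []).getD v []).getD j 0)).sum =
      (((pvPermsLast (List.range n)).countP (fun p => pvFwd T p = j) : Nat) : Int) := by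
    intro j hj
    have h1 : ((List.range n).map (fun v => ((dp2.getD (2 ^ n - 1) []).getD v []).getD j 0)).sum
        = ((List.range n).map (fun v => pvF T n (2 ^ n - 1) v j)).sum := by
      apply congrArg List.sum
      apply List.map_congr_left
      intro v hv
      exact hfullG v j (List.mem_range.mp hv) hj
    rw [h1]
    have hne : (List.range n) ≠ [] := by
      intro h
      rw [List.range_eq_nil] at h
      omega
    rw [pvPermsLast_flat _ hne, List.countP_flatMap, Nat.cast_list_sum, List.map_map]
    apply congrArg List.sum
    apply List.map_congr_left
    intro v hv
    simp only [Function.comp]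
    rw [List.countP_map, ← List.Nodup.erase_eq_filter List.nodup_range v]
    have hlem := pvLemB T n n (List.range n) (by simp) List.nodup_range
      (fun x hx => List.mem_range.mp hx) v hv j hj
    rw [pvMask_range] at hlem
    exact hlem
  have hNf : (List.range n).foldl (fun Nf v => (List.range n).foldl
        (fun Nf f => Nf.modify f (fun x => x +
          ((dp2.getD (2 ^ n - 1) []).getD v []).getD f 0)) Nf)
      (List.replicate n (0 : Int)) =
      (pvPermsLast (List.range n)).foldl (fun Nf p => Nf.modify
        ((List.range (n - 1)).foldl (fun f i =>
          if (T.getD (p.getD i 0) []).getD (p.getD (i + 1) 0) 0 ≠ 0 then f + 1 else f) 0)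
        (fun x => x + 1)) (List.replicate n (0 : Int)) := by
    apply List.ext_getElem
    · rw [hAL, hBL]
    · intro j h1 h2
      have hj : j < n := by
        have := hAL
        rw [List.length_replicate] at this
        omega
      rw [← List.getD_eq_getElem _ 0 h1, ← List.getD_eq_getElem _ 0 h2]
      rw [hAG j, hBG j (by simpa using hj)]
      rw [List.getD_replicate _ hj]
      have hc : j < n ∧ j < (List.replicate n (0 : Int)).length := ⟨hj, by simpa using hj⟩
      rw [if_pos hc, hAB j hj]
      have hcnt : (pvPermsLast (List.range n)).countP (fun p =>
          (List.range (n - 1)).foldl (fun f i =>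
            if (T.getD (p.getD i 0) []).getD (p.getD (i + 1) 0) 0 ≠ 0 then f + 1 else f) 0 = j) =
          (pvPermsLast (List.range n)).countP (fun p => pvFwd T p = j) := by
        apply List.countP_congr
        intro p hp
        simp only [decide_eq_true_eq]
        rw [hh p hp]
      rw [hcnt]
  rw [hNf]
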